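-- pv_equiv track=rewrite | github.com/phutharesuanwachirapisut/Ph_Python | dev_lab/ATM_pass.py | ATM_pass
-- ===== SOURCE A (Python) =====
-- import string
--
-- def ATM_pass(sentence):
--     list_a = []
--     indy = 0
--     while indy <= len(sentence) - 1:
--         test_ = str()
--         d = sentence[indy]
--         if sentence[indy] in string.digits:
--             test_ = sentence[indy]
--             indy += 1
--             if indy == len(sentence):
--                 list_a.append(test_)
--             else:
--                 while sentence[indy] in string.digits:
--                     d = sentence[indy]
--                     test_ += sentence[indy]
--                     indy += 1
--                 list_a.append(test_)
--
--         else: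
--             indy += 1
--     result = list(map(lambda x: int(x) , list_a))
--     result = sum(result)
--     if len(str(result)) < 4:
--         result = str(result).zfill(4)
--     else:
--         result = str(result)
--     return result
-- ===== SOURCE B (Python) =====
-- def ATM_pass(sentence):
--     masked = ''.join(c if '0' <= c <= '9' else ' ' for c in sentence)
--     total = sum(int(tok) for tok in masked.split())
--     return str(total).zfill(4)
-- ===== Notes on version B (the rewrite author's own statement) =====
-- stated objective: simpler
-- what changed: A scans by hand with an index and a nested while loop building a token list, then maps int and sums; B maps every non-digit character to a space, splits on whitespace, sums the int of each token and zfills, removing all per-character index management and method-call overhead.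
import Mathlib
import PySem

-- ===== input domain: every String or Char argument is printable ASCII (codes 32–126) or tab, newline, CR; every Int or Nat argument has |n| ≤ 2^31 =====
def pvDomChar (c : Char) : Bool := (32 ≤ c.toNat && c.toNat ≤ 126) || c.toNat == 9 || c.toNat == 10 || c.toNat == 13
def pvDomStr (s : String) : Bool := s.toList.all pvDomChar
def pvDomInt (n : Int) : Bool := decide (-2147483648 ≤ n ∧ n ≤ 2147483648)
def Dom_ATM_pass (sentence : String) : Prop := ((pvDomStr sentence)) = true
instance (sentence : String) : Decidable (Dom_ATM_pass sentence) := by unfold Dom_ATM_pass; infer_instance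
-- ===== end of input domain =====

-- ===== PORT A =====
-- B replaces A's index-driven double while-loop tokenizer by mask-non-digits-to-space + split + sum (objective: simpler).
-- `sentence[indy] in string.digits` on a single character is exactly the ASCII-digit test (PySem.Chars.isdigit).

-- inner while loop of A: consumes digits, accumulating into `acc`; `none` = the loop ran
-- off the end of the string, where Python raises IndexError (excluded by Pre_ATM_pass).
def pvInnerA (acc : List Char) : List Char → Option (List Char × List Char)
  | [] => none
  | c :: rest =>
    if PySem.Chars.isdigit c then pvInnerA (acc ++ [c]) rest else some (acc, c :: rest)

theorem pvInnerA_rest_le (acc l : List Char) {t r : List Char}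
    (h : pvInnerA acc l = some (t, r)) : r.length ≤ l.length := by
  induction l generalizing acc with
  | nil => simp [pvInnerA] at h
  | cons c rest ih =>
    simp only [pvInnerA] at h
    split at h
    · exact le_trans (ih _ h) (Nat.le_succ _)
    · cases h; simp

-- outer while loop of A: produces the list `list_a` of digit tokens.
def pvTokensA : List Char → List (List Char)
  | [] => []
  | c :: rest =>
    if PySem.Chars.isdigit c then
      match rest with
      | [] => [[c]]
      | d :: rs =>
        match h : pvInnerA [c] (d :: rs) with
        | none => []          -- Python raises IndexError here (outside Pre_ATM_pass)
        | some (tok, rest') => tok :: pvTokensA rest'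
    else pvTokensA rest
  termination_by l => l.length
  decreasing_by
  · exact Nat.lt_succ_of_le (pvInnerA_rest_le _ _ h)
  · simp

def ATM_pass (sentence : String) : String :=
  let listA := pvTokensA sentence.toList
  -- int(x) never raises here: every token is a nonempty run of digits
  let result : Int := (listA.map (fun x => (PySem.Int.ofChars? x).getD 0)).sum
  if (PySem.Int.toChars result).length < 4 then
    String.ofList (PySem.Chars.zfill (PySem.Int.toChars result) 4)
  else
    String.ofList (PySem.Int.toChars result)

-- ===== PORT B =====
def ATM_pass_alt (sentence : String) : String :=
  let masked := sentence.toList.map (fun c => if PySem.Chars.isdigit c then c else ' ')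
  let total : Int := ((PySem.Chars.split₀ masked).map (fun t => (PySem.Int.ofChars? t).getD 0)).sum
  String.ofList (PySem.Chars.zfill (PySem.Int.toChars total) 4)

-- ===== PRECONDITION & SPEC =====
-- Bool test: does the char list end in two ASCII digits?
def pvEnds2 (l : List Char) : Bool :=
  match l.reverse with
  | a :: b :: _ => PySem.Chars.isdigit a && PySem.Chars.isdigit b
  | _ => false

-- Pre_ excludes exactly the strings ending in two ASCII digits, on which A's inner while
-- loop runs past the end of the string and raises IndexError.
def Pre_ATM_pass (sentence : String) : Prop := pvEnds2 sentence.toList = false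
instance (sentence : String) : Decidable (Pre_ATM_pass sentence) := by
  unfold Pre_ATM_pass; infer_instance
def pvWitness_ATM_pass : String := "ab1 2c3"

def Spec_ATM_pass (sentence : String) (out : String) : Prop := out = ATM_pass_alt sentence
instance (sentence : String) (out : String) : Decidable (Spec_ATM_pass sentence out) := by
  unfold Spec_ATM_pass; infer_instance

-- ===== CLAIM (what is proved, stated in full; the proofs are below) =====
def Claim_equal_ATM_pass : Prop := ∀ (sentence : String), Dom_ATM_pass sentence → Pre_ATM_pass sentence → Spec_ATM_pass sentence (ATM_pass sentence)
-- ===== LEMMAS AND PROOFS =====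

-- reference tokenizer both ports are reduced to
def pvRef : List Char → List (List Char)
  | [] => []
  | c :: rest =>
    if PySem.Chars.isdigit c then
      (c :: rest.takeWhile PySem.Chars.isdigit) :: pvRef (rest.dropWhile PySem.Chars.isdigit)
    else pvRef rest
  termination_by l => l.length
  decreasing_by
  · exact Nat.lt_succ_of_le (List.length_dropWhile_le _ _)
  · simp

theorem pvInnerA_spec (acc l : List Char) (h : ∃ c ∈ l, ¬ PySem.Chars.isdigit c) :
    pvInnerA acc l = some (acc ++ l.takeWhile PySem.Chars.isdigit, l.dropWhile PySem.Chars.isdigit) := by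
  induction l generalizing acc with
  | nil => simp at h
  | cons c rest ih =>
    by_cases hc : PySem.Chars.isdigit c
    · obtain ⟨d, hd, hnd⟩ := h
      rcases List.mem_cons.mp hd with rfl | hd'
      · exact absurd hc hnd
      · simp [pvInnerA, hc, List.takeWhile, List.dropWhile, ih (acc ++ [c]) ⟨d, hd', hnd⟩]
    · simp [pvInnerA, hc, List.takeWhile, List.dropWhile]

theorem pvOk_suffix {l r : List Char} (h : r <:+ l) (hl : pvEnds2 l = false) :
    pvEnds2 r = false := by
  obtain ⟨p, rfl⟩ := h
  unfold pvEnds2 at *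
  rw [List.reverse_append] at hl
  cases hr : r.reverse with
  | nil => rfl
  | cons a t =>
    cases t with
    | nil => rfl
    | cons b t' => rw [hr] at hl; simpa using hl

theorem pvTokensA_eq_ref (l : List Char) (hok : pvEnds2 l = false) : pvTokensA l = pvRef l := by
  induction hn : l.length using Nat.strong_induction_on generalizing l with
  | _ n ih =>
  subst hn
  cases l with
  | nil => simp [pvTokensA, pvRef]
  | cons c rest =>
    by_cases hc : PySem.Chars.isdigit c
    · cases rest with
      | nil => simp [pvTokensA, pvRef, hc]
      | cons d rest' =>
        have hne : ∃ x ∈ d :: rest', ¬ PySem.Chars.isdigit x := by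
          by_contra hall
          push_neg at hall
          -- then l ends with two digits: contradiction with pvEnds2 l = false
          unfold pvEnds2 at hok
          cases hr : (c :: d :: rest').reverse with
          | nil => simp at hr
          | cons a t =>
            cases t with
            | nil => have := congrArg List.length hr; simp at this
            | cons b t' =>
              rw [hr] at hok
              simp only [Bool.and_eq_false_iff] at hok
              have ha : a ∈ c :: d :: rest' := by
                rw [← List.mem_reverse, hr]; simp
              have hb : b ∈ c :: d :: rest' := by
                rw [← List.mem_reverse, hr]; simp
              have hda : PySem.Chars.isdigit a = true := by
                rcases List.mem_cons.mp ha with rfl | ha'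
                · exact hc
                · exact hall a ha'
              have hdb : PySem.Chars.isdigit b = true := by
                rcases List.mem_cons.mp hb with rfl | hb'
                · exact hc
                · exact hall b hb'
              rcases hok with h1 | h1 <;> simp [h1] at hda hdb
        rw [pvTokensA.eq_def, pvRef.eq_def]
        simp only [hc, if_pos]
        rw [pvInnerA_spec [c] (d :: rest') hne]
        simp only [List.cons_append, List.nil_append]
        have hsuf : (d :: rest').dropWhile PySem.Chars.isdigit <:+ c :: d :: rest' :=
          (List.dropWhile_suffix _).trans (List.suffix_cons _ _)
        have hlt : ((d :: rest').dropWhile PySem.Chars.isdigit).length < (c :: d :: rest').length :=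
          Nat.lt_succ_of_le (List.length_dropWhile_le _ _)
        rw [ih _ hlt _ (pvOk_suffix hsuf hok) rfl]
    · rw [pvTokensA.eq_def, pvRef.eq_def]
      simp only [hc, Bool.false_eq_true, if_false]
      exact ih rest.length (by simp) rest (pvOk_suffix (List.suffix_cons _ _) hok) rfl

theorem pvSplit₀_go_spec (l : List Char) : ∀ (cur : List Char) (acc : List (List Char)),
    PySem.Chars.split₀.go (l.map (fun c => if PySem.Chars.isdigit c then c else ' ')) cur acc =
      acc.reverse ++ (if cur.isEmpty then pvRef l
        else (cur.reverse ++ l.takeWhile PySem.Chars.isdigit) :: pvRef (l.dropWhile PySem.Chars.isdigit)) := by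
  induction l with
  | nil =>
    intro cur acc
    cases cur <;> simp [PySem.Chars.split₀.go, pvRef]
  | cons c rest ih =>
    intro cur acc
    by_cases hc : PySem.Chars.isdigit c
    · have hns : PySem.Chars.isspace c = false := by
        have h0 : '0' ≤ c := by
          have := hc; unfold PySem.Chars.isdigit at this; simpa using (Bool.and_elim_left this)
        have h9 : c ≤ '9' := by
          have := hc; unfold PySem.Chars.isdigit at this; simpa using (Bool.and_elim_right this)
        have h0' : 48 ≤ c.toNat := h0
        have h9' : c.toNat ≤ 57 := h9
        unfold PySem.Chars.isspace
        simp only []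
        simp
        omega
      rw [List.map_cons, if_pos hc, PySem.Chars.split₀.go, if_neg (by simp [hns])]
      rw [ih (c :: cur) acc]
      cases cur <;> simp [pvRef, hc, List.takeWhile, List.dropWhile]
    · have hsp : PySem.Chars.isspace ' ' = true := by decide
      rw [List.map_cons, if_neg hc, PySem.Chars.split₀.go, if_pos hsp]
      cases cur with
      | nil => rw [ih [] acc]; simp [pvRef, hc]
      | cons x t =>
        simp only [List.isEmpty_cons]
        rw [ih [] ((x :: t).reverse :: acc)]
        simp [pvRef, hc, List.takeWhile, List.dropWhile]

theorem pvSplit₀_mask (l : List Char) :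
    PySem.Chars.split₀ (l.map (fun c => if PySem.Chars.isdigit c then c else ' ')) = pvRef l := by
  have := pvSplit₀_go_spec l [] []
  simpa [PySem.Chars.split₀] using this

-- ===== VERDICT (by name: the statement is the Claim_ definition above) =====
theorem ATM_pass_spec : Claim_equal_ATM_pass := by
  intro sentence _ hpre
  simp only [Spec_ATM_pass, ATM_pass, ATM_pass_alt]
  rw [pvSplit₀_mask, ← pvTokensA_eq_ref _ hpre]
  by_cases h : (PySem.Int.toChars ((pvTokensA sentence.toList).map
      (fun x => (PySem.Int.ofChars? x).getD 0)).sum).length < 4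
  · rw [if_pos h]
  · rw [if_neg h]
    have hz : PySem.Chars.zfill (PySem.Int.toChars ((pvTokensA sentence.toList).map
        (fun x => (PySem.Int.ofChars? x).getD 0)).sum) 4 =
        PySem.Int.toChars ((pvTokensA sentence.toList).map
        (fun x => (PySem.Int.ofChars? x).getD 0)).sum := by
      unfold PySem.Chars.zfill
      rw [if_pos (by omega)]
    rw [hz]
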